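-- pv_equiv track=rewrite | github.com/safpla/t2t | deeplycurious/utils/label_translate.py | _iob2iobe
-- ===== SOURCE A (Python) =====
-- def _iob2iobe(line, iob_dict=None, iobe_dict=None):
--     if iob_dict is None:
--         iob_dict = {'I':'I', 'O':'O', 'B':'B'}
--     if iobe_dict is None:
--         iobe_dict = {'I':'I', 'O':'O', 'B':'B', 'E':'E'}
--
--     iobe_line = []
--     start = 0
--     len_line = len(line)
--     while start < len_line:
--         if line[start] == iob_dict['O']:
--             iobe_line.append(iobe_dict['O'])
--             start += 1
--         else:
--             stop = start + 1
--             while stop < len_line and line[stop] == iob_dict['I']: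
--                 stop += 1
--             entity = [iobe_dict['I']] * (stop - start)
--             entity[-1] = iobe_dict['E']
--             entity[0] = iobe_dict['B']
--             iobe_line.extend(entity)
--             start = stop
--     return iobe_line
-- ===== SOURCE B (Python) =====
-- def _iob2iobe(line, iob_dict=None, iobe_dict=None):
--     if iob_dict is None:
--         iob_dict = {'I': 'I', 'O': 'O', 'B': 'B'}
--     if iobe_dict is None:
--         iobe_dict = {'I': 'I', 'O': 'O', 'B': 'B', 'E': 'E'}
--     n = len(line)
--     out = []
--     for i in range(n):
--         if line[i] == iob_dict['O']:
--             out.append(iobe_dict['O'])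
--         elif i == 0 or line[i - 1] == iob_dict['O'] or line[i] != iob_dict['I']:
--             out.append(iobe_dict['B'])
--         elif i == n - 1 or line[i + 1] != iob_dict['I']:
--             out.append(iobe_dict['E'])
--         else:
--             out.append(iobe_dict['I'])
--     return out
-- ===== Notes on version B (the rewrite author's own statement) =====
-- stated objective: simpler
-- what changed: Replaced A's nested scan (outer while plus inner while that finds each entity's end and builds a mutated entity buffer) by a single flat loop that classifies every position independently from its two neighbours.
-- outside the precondition, e.g. on _iob2iobe(['a', 'X'], {'O': 'X', 'I': 'X', 'B': 'B'}, None): A returns ['B', 'E'], B returns ['B', 'O']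
import Mathlib
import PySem

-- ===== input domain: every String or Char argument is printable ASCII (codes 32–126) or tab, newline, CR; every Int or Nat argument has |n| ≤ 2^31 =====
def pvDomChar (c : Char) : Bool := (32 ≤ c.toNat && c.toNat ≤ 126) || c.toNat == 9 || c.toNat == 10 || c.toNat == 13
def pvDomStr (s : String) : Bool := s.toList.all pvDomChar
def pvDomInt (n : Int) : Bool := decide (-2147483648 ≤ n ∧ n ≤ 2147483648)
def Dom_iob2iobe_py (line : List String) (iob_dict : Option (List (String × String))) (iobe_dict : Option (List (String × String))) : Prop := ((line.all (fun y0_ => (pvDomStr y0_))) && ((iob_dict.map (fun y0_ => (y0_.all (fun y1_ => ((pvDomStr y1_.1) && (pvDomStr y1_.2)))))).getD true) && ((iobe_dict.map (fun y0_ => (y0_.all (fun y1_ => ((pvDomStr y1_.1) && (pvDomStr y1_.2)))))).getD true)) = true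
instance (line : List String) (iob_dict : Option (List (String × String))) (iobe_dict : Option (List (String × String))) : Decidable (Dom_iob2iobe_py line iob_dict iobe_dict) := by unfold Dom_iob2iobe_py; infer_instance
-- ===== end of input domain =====

-- B replaces A's nested segment scan (inner while + entity buffer) by ONE flat loop that
-- classifies each position from its two neighbours; objective: simpler, same O(n) cost.

-- ===== PORT A =====
-- shared helpers: the default dicts and first-match dict lookup (value of d[k]; "" only outside Pre_)
def pvDefIob : List (String × String) := [("I","I"),("O","O"),("B","B")]
def pvDefIobe : List (String × String) := [("I","I"),("O","O"),("B","B"),("E","E")]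
def pvGetK (d : List (String × String)) (k : String) : String :=
  ((d.find? (fun p => p.1 == k)).map Prod.snd).getD ""

-- inner while: while stop < len_line and line[stop] == iob_dict['I']: stop += 1
def pvFindStop (line : List String) (iv : String) (stop : Nat) : Nat :=
  if stop < line.length then
    if line.getD stop "" == iv then pvFindStop line iv (stop + 1) else stop
  else stop
termination_by line.length - stop

-- pvFindStop never moves backwards (cited by pvALoop's decreasing_by)
theorem pvFindStop_ge (line : List String) (iv : String) (stop : Nat) :
    stop ≤ pvFindStop line iv stop := by
  fun_induction pvFindStop <;> omega

-- entity = [iobe['I']] * (stop-start); entity[-1] = iobe['E']; entity[0] = iobe['B']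
def pvEntity (k : Nat) (iv ev bv : String) : List String :=
  ((List.replicate k iv).set (k - 1) ev).set 0 bv

-- outer while over start
def pvALoop (line : List String) (iob iobe : List (String × String)) (start : Nat)
    (acc : List String) : List String :=
  if _h : start < line.length then
    if line.getD start "" == pvGetK iob "O" then
      pvALoop line iob iobe (start + 1) (acc ++ [pvGetK iobe "O"])
    else
      let stop := pvFindStop line (pvGetK iob "I") (start + 1)
      pvALoop line iob iobe stop
        (acc ++ pvEntity (stop - start) (pvGetK iobe "I") (pvGetK iobe "E") (pvGetK iobe "B"))
  else acc
termination_by line.length - start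
decreasing_by
  · omega
  · have := pvFindStop_ge line (pvGetK iob "I") (start + 1); omega

def iob2iobe_py (line : List String) (iob_dict : Option (List (String × String))) (iobe_dict : Option (List (String × String))) : List String :=
  pvALoop line (iob_dict.getD pvDefIob) (iobe_dict.getD pvDefIobe) 0 []

-- ===== PORT B =====
-- flat per-index classification by neighbours (Source B's branch chain, same order)
def pvClassify (line : List String) (iob iobe : List (String × String)) (i : Nat) : String :=
  if line.getD i "" == pvGetK iob "O" then pvGetK iobe "O"
  else if i == 0 || line.getD (i - 1) "" == pvGetK iob "O" || line.getD i "" != pvGetK iob "I" then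
    pvGetK iobe "B"
  else if i == line.length - 1 || line.getD (i + 1) "" != pvGetK iob "I" then pvGetK iobe "E"
  else pvGetK iobe "I"

def iob2iobe_py_alt (line : List String) (iob_dict : Option (List (String × String))) (iobe_dict : Option (List (String × String))) : List String :=
  (List.range line.length).map
    (pvClassify line (iob_dict.getD pvDefIob) (iobe_dict.getD pvDefIobe))

-- ===== PRECONDITION & SPEC =====
-- Pre_ admits exactly the inputs on which A returns (each dict key A looks up is present),
-- EXCEPT that it also excludes dicts mapping 'O' and 'I' to the same tag while a non-O tag
-- occurs before the last position: there A's inner scan swallows the shared tag into the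
-- entity while B's O-branch claims it first — a degenerate dict where either reading is
-- defensible.
def Pre_iob2iobe_py (line : List String) (iob_dict : Option (List (String × String))) (iobe_dict : Option (List (String × String))) : Prop :=
  line = [] ∨
  ((∃ p ∈ iob_dict.getD pvDefIob, p.1 = "O") ∧
   ((∃ s ∈ line.dropLast, s ≠ pvGetK (iob_dict.getD pvDefIob) "O") →
      ((∃ p ∈ iob_dict.getD pvDefIob, p.1 = "I") ∧
       pvGetK (iob_dict.getD pvDefIob) "I" ≠ pvGetK (iob_dict.getD pvDefIob) "O")) ∧
   ((pvGetK (iob_dict.getD pvDefIob) "O") ∈ line →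
      (∃ p ∈ iobe_dict.getD pvDefIobe, p.1 = "O")) ∧
   ((∃ s ∈ line, s ≠ pvGetK (iob_dict.getD pvDefIob) "O") →
      ((∃ p ∈ iobe_dict.getD pvDefIobe, p.1 = "I") ∧
       (∃ p ∈ iobe_dict.getD pvDefIobe, p.1 = "E") ∧
       (∃ p ∈ iobe_dict.getD pvDefIobe, p.1 = "B"))))
instance (line : List String) (iob_dict : Option (List (String × String))) (iobe_dict : Option (List (String × String))) : Decidable (Pre_iob2iobe_py line iob_dict iobe_dict) := by
  unfold Pre_iob2iobe_py; infer_instance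

def pvWitness_iob2iobe_py : List String × (Option (List (String × String))) × (Option (List (String × String))) :=
  (["B", "I", "O", "B"], none, none)

def Spec_iob2iobe_py (line : List String) (iob_dict : Option (List (String × String))) (iobe_dict : Option (List (String × String))) (out : List String) : Prop := out = iob2iobe_py_alt line iob_dict iobe_dict
instance (line : List String) (iob_dict : Option (List (String × String))) (iobe_dict : Option (List (String × String))) (out : List String) : Decidable (Spec_iob2iobe_py line iob_dict iobe_dict out) := by unfold Spec_iob2iobe_py; infer_instance

-- ===== CLAIM (what is proved, stated in full; the proofs are below) =====
def Claim_equal_iob2iobe_py : Prop := ∀ (line : List String) (iob_dict : Option (List (String × String))) (iobe_dict : Option (List (String × String))), Dom_iob2iobe_py line iob_dict iobe_dict → Pre_iob2iobe_py line iob_dict iobe_dict → Spec_iob2iobe_py line iob_dict iobe_dict (iob2iobe_py line iob_dict iobe_dict)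

-- ===== LEMMAS AND PROOFS =====

-- a loop start position: beginning, after an O, or a char the inner scan would not have consumed
def pvBoundary (line : List String) (iob : List (String × String)) (start : Nat) : Prop :=
  start = 0 ∨ line.getD (start - 1) "" = pvGetK iob "O" ∨ line.getD start "" ≠ pvGetK iob "I"

theorem pvFindStop_le (line : List String) (iv : String) (stop : Nat)
    (h : stop ≤ line.length) : pvFindStop line iv stop ≤ line.length := by
  fun_induction pvFindStop <;> omega

theorem pvFindStop_mem (line : List String) (iv : String) (stop : Nat) :
    ∀ j, stop ≤ j → j < pvFindStop line iv stop → line.getD j "" = iv := by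
  fun_induction pvFindStop with
  | case1 stop h heq ih =>
    intro j hj1 hj2
    rcases Nat.eq_or_lt_of_le hj1 with rfl | h'
    · exact eq_of_beq heq
    · exact ih j h' hj2
  | case2 => omega
  | case3 => omega

theorem pvFindStop_stop (line : List String) (iv : String) (stop : Nat)
    (h : pvFindStop line iv stop < line.length) :
    line.getD (pvFindStop line iv stop) "" ≠ iv := by
  fun_induction pvFindStop with
  | case1 stop h' heq ih => exact ih h
  | case2 stop h' heq => intro hc; exact heq (beq_iff_eq.mpr hc)
  | case3 stop h' => omega

theorem pvEntity_getElem (k : Nat) (iv ev bv : String) (m : Nat) (hm : m < k) :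
    (pvEntity k iv ev bv).getD m "" =
      if m = 0 then bv else if m = k - 1 then ev else iv := by
  unfold pvEntity
  rw [List.getD_eq_getElem?_getD, List.getElem?_eq_getElem (by simp; omega)]
  simp only [List.getElem_set, List.getElem_replicate, Option.getD_some]
  by_cases h0 : m = 0 <;> by_cases hk : m = k - 1 <;>
    simp [h0, hk, eq_comm]

theorem pvClassify_O (line : List String) (iob iobe : List (String × String)) (i : Nat)
    (h : line.getD i "" = pvGetK iob "O") :
    pvClassify line iob iobe i = pvGetK iobe "O" := by
  simp only [pvClassify, List.getD_eq_getElem?_getD] at *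
  simp [h]

theorem pvClassify_B (line : List String) (iob iobe : List (String × String)) (i : Nat)
    (hno : line.getD i "" ≠ pvGetK iob "O")
    (hb : i = 0 ∨ line.getD (i - 1) "" = pvGetK iob "O" ∨ line.getD i "" ≠ pvGetK iob "I") :
    pvClassify line iob iobe i = pvGetK iobe "B" := by
  simp only [pvClassify, List.getD_eq_getElem?_getD] at *
  rcases hb with rfl | hb | hb
  · simp [hno]
  · simp [hno, hb]
  · simp [hno, hb]

theorem pvClassify_E (line : List String) (iob iobe : List (String × String)) (i : Nat)
    (hno : line.getD i "" ≠ pvGetK iob "O") (h0 : i ≠ 0)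
    (hp : line.getD (i - 1) "" ≠ pvGetK iob "O") (hc : line.getD i "" = pvGetK iob "I")
    (he : i = line.length - 1 ∨ line.getD (i + 1) "" ≠ pvGetK iob "I") :
    pvClassify line iob iobe i = pvGetK iobe "E" := by
  simp only [pvClassify, List.getD_eq_getElem?_getD] at *
  have hio : pvGetK iob "I" ≠ pvGetK iob "O" := fun hq => hno (by rw [hc, hq])
  rcases he with rfl | he
  · simp [h0, hp, hc, hio]
  · simp [h0, hp, hc, he, hio]

theorem pvClassify_I (line : List String) (iob iobe : List (String × String)) (i : Nat)
    (hno : line.getD i "" ≠ pvGetK iob "O") (h0 : i ≠ 0)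
    (hp : line.getD (i - 1) "" ≠ pvGetK iob "O") (hc : line.getD i "" = pvGetK iob "I")
    (hl : i ≠ line.length - 1) (hn : line.getD (i + 1) "" = pvGetK iob "I") :
    pvClassify line iob iobe i = pvGetK iobe "I" := by
  simp only [pvClassify, List.getD_eq_getElem?_getD] at *
  have hio : pvGetK iob "I" ≠ pvGetK iob "O" := fun hq => hno (by rw [hc, hq])
  simp [h0, hp, hc, hl, hn, hio]

-- the entity A emits for the segment [start, stop) is B's classification of those indices
theorem pvEntity_eq_map (line : List String) (iob iobe : List (String × String))
    (start stop : Nat) (h1 : start + 1 ≤ stop) (h2 : stop ≤ line.length)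
    (hcur : line.getD start "" ≠ pvGetK iob "O")
    (hmem : ∀ j, start + 1 ≤ j → j < stop → line.getD j "" = pvGetK iob "I")
    (hend : stop = line.length ∨ line.getD stop "" ≠ pvGetK iob "I")
    (hivov : start + 1 < stop → pvGetK iob "I" ≠ pvGetK iob "O")
    (hbound : pvBoundary line iob start) :
    pvEntity (stop - start) (pvGetK iobe "I") (pvGetK iobe "E") (pvGetK iobe "B") =
      (List.range' start (stop - start)).map (pvClassify line iob iobe) := by
  apply List.ext_getElem
  · simp [pvEntity]
  intro m hm1 hm2
  have hmk : m < stop - start := by simpa [pvEntity] using hm1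
  rw [← List.getD_eq_getElem _ "" hm1, pvEntity_getElem _ _ _ _ m hmk]
  rw [List.getElem_map, List.getElem_range']
  simp only [one_mul]
  by_cases h0 : m = 0
  · subst h0
    rw [if_pos rfl]
    exact (pvClassify_B line iob iobe start hcur hbound).symm
  · rw [if_neg h0]
    have hcm : line.getD (start + m) "" = pvGetK iob "I" :=
      hmem _ (by omega) (by omega)
    have hio : pvGetK iob "I" ≠ pvGetK iob "O" := hivov (by omega)
    have hpne : line.getD (start + m - 1) "" ≠ pvGetK iob "O" := by
      by_cases hm1' : m = 1
      · subst hm1'; simpa using hcur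
      · have : line.getD (start + m - 1) "" = pvGetK iob "I" :=
          hmem _ (by omega) (by omega)
        rw [this]; exact hio
    by_cases hlast : m = stop - start - 1
    · rw [if_pos hlast]
      refine (pvClassify_E line iob iobe (start + m) (by rw [hcm]; exact hio)
        (by omega) hpne hcm ?_).symm
      rcases hend with hE | hE
      · left; omega
      · right; have : start + m + 1 = stop := by omega
        rw [this]; exact hE
    · rw [if_neg hlast]
      refine (pvClassify_I line iob iobe (start + m) (by rw [hcm]; exact hio)
        (by omega) hpne hcm (by omega) ?_).symm
      exact hmem _ (by omega) (by omega)

-- main loop invariant: from any boundary start, A's loop emits B's classification of [start, n)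
theorem pvALoop_eq (line : List String) (iob iobe : List (String × String))
    (hiv : (∃ s ∈ line.dropLast, s ≠ pvGetK iob "O") → pvGetK iob "I" ≠ pvGetK iob "O") :
    ∀ start acc, pvBoundary line iob start →
      pvALoop line iob iobe start acc =
        acc ++ (List.range' start (line.length - start)).map (pvClassify line iob iobe) := by
  intro start acc
  fun_induction pvALoop line iob iobe start acc with
  | case1 start acc h heq ih =>
    intro _
    have hb : pvBoundary line iob (start + 1) := by
      right; left; simpa using eq_of_beq heq
    rw [ih hb]
    have hr : line.length - start = (line.length - (start + 1)) + 1 := by omega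
    rw [hr, List.range'_succ, List.map_cons,
      pvClassify_O line iob iobe start (eq_of_beq heq)]
    simp
  | case2 start acc h heq stopv ih =>
    intro hbound
    have hcur : line.getD start "" ≠ pvGetK iob "O" := by simpa using heq
    have h1 : start + 1 ≤ stopv := pvFindStop_ge line _ (start + 1)
    have h2 : stopv ≤ line.length := pvFindStop_le line _ (start + 1) (by omega)
    have hmem : ∀ j, start + 1 ≤ j → j < stopv → line.getD j "" = pvGetK iob "I" :=
      pvFindStop_mem line _ (start + 1)
    have hend : stopv = line.length ∨ line.getD stopv "" ≠ pvGetK iob "I" := by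
      by_cases hc : stopv < line.length
      · exact Or.inr (pvFindStop_stop line _ (start + 1) hc)
      · left; omega
    have hivov : start + 1 < stopv → pvGetK iob "I" ≠ pvGetK iob "O" := by
      intro hlt
      apply hiv
      refine ⟨line.getD start "", ?_, hcur⟩
      have hsl : start < line.dropLast.length := by simp; omega
      have hgd : line.getD start "" = line.dropLast[start] := by
        rw [List.getElem_dropLast, List.getD_eq_getElem _ "" (by omega)]
      rw [hgd]
      exact List.getElem_mem hsl
    have hent := pvEntity_eq_map line iob iobe start stopv h1 h2 hcur hmem hend hivov hbound
    have hsplit : List.range' start (line.length - start) =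
        List.range' start (stopv - start) ++ List.range' stopv (line.length - stopv) := by
      have e1 : start + (stopv - start) = stopv := by omega
      rw [show line.length - start = (stopv - start) + (line.length - stopv) from by omega,
        ← List.range'_append_1, e1]
    rcases hend with hE | hNe
    · rw [pvALoop, dif_neg (by omega), hent, hsplit]
      simp [hE]
    · have hb : pvBoundary line iob stopv := Or.inr (Or.inr hNe)
      rw [ih hb, hent, hsplit, List.map_append, List.append_assoc]
  | case3 start acc h =>
    intro _
    have : line.length - start = 0 := by omega
    simp [this]

-- ===== VERDICT (by name: the statement is the Claim_ definition above) =====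
theorem iob2iobe_py_spec : Claim_equal_iob2iobe_py := by
  intro line iobD iobeD _ hpre
  unfold Spec_iob2iobe_py iob2iobe_py iob2iobe_py_alt
  have hiv : (∃ s ∈ line.dropLast, s ≠ pvGetK (iobD.getD pvDefIob) "O") →
      pvGetK (iobD.getD pvDefIob) "I" ≠ pvGetK (iobD.getD pvDefIob) "O" := by
    rcases hpre with rfl | ⟨_, hI, _, _⟩
    · intro h; simp at h
    · exact fun h => (hI h).2
  rw [pvALoop_eq line _ _ hiv 0 [] (Or.inl rfl)]
  simp [List.range_eq_range']
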